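-- pv_equiv track=rewrite | github.com/RemyPorter/Mangler | mangler/analyzer.py | frame_smear
-- ===== SOURCE A (Python) =====
-- def frame_smear(chan, start, end, block_size):
--     segment = chan[start:end]
--     count = 0
--     res = []
--     for s in segment:
--         if count % 4 == 0:
--             res.append(s)
--         else:
--             res.append(res[-1])
--         count += 1
--     chan[start:end] = res
--     return chan
-- ===== SOURCE B (Python) =====
-- def frame_smear(chan, start, end, block_size):
--     segment = chan[start:end]
--     res = []
--     i = 0
--     n = len(segment)
--     while i < n:
--         chunk = segment[i:i+4]
--         res.extend([chunk[0]] * len(chunk))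
--         i += 4
--     chan[start:end] = res
--     return chan
-- ===== Notes on version B (the rewrite author's own statement) =====
-- stated objective: simpler
-- what changed: Replaces A's per-element loop with a running count % 4 branch that copies res[-1] by a chunked pass: for each 4-element slice of the segment, append its head repeated for the chunk's length; no prior output is ever read.
import Mathlib
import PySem

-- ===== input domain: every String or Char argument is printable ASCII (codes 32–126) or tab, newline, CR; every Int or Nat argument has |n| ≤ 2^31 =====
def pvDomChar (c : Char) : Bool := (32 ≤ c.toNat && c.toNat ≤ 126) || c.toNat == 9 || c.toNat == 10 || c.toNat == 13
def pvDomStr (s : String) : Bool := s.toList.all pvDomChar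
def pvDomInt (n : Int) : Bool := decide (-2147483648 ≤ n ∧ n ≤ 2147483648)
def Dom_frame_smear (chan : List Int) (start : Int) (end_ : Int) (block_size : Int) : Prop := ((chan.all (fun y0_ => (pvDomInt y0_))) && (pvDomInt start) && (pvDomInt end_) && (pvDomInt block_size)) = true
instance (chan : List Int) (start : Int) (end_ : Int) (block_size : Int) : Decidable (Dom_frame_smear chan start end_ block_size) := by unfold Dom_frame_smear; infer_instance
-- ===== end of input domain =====

-- B replaces A's per-element loop (a count % 4 branch reading the running res[-1]) by a
-- chunked pass: take each 4-element slice of the segment and repeat its head; objective: simpler.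
-- Both Pythons mutate chan in place via the same slice assignment 'chan[start:end] = res'
-- (res has the slice's length), so the mutation is identical; the theorems are about the return value.

-- Shared transliteration of the statement 'chan[start:end] = res' (Python slice assignment),
-- which both Pythons perform literally: take the clamped prefix, insert res, keep the clamped suffix.
def pySliceAssign (xs : List Int) (a b : Int) (v : List Int) : List Int :=
  let i := PySem.List.clampIdx xs.length a
  let j := max i (PySem.List.clampIdx xs.length b)
  xs.take i ++ v ++ xs.drop j

-- ===== PORT A =====
-- A's for-loop over segment with state (res, count); res.append(res[-1]) uses pyGet? res (-1)
-- (the none branch is unreachable: count % 4 ≠ 0 forces res nonempty).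
def frameSmearLoopA : List Int → List Int → Int → List Int
  | [], res, _ => res
  | s :: t, res, count =>
    if count % 4 == 0 then frameSmearLoopA t (res ++ [s]) (count + 1)
    else
      match PySem.List.pyGet? res (-1) with
      | some v => frameSmearLoopA t (res ++ [v]) (count + 1)
      | none => frameSmearLoopA t res (count + 1)

def frame_smear (chan : List Int) (start : Int) (end_ : Int) (block_size : Int) : List Int :=
  pySliceAssign chan start end_
    (frameSmearLoopA (PySem.List.slice chan (some start) (some end_)) [] 0)

-- ===== PORT B =====
-- B's while-loop: i runs 0, 4, 8, …; chunk = segment[i:i+4]; res.extend([chunk[0]] * len(chunk)).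
def frameSmearLoopB (seg : List Int) (i : Nat) (res : List Int) : List Int :=
  if h : i < seg.length then
    let chunk := PySem.List.slice seg (some (i : Int)) (some ((i : Int) + 4))
    match chunk with
    | [] => res  -- unreachable: i < len seg makes the chunk nonempty (chunk[0] never raises)
    | c :: _ => frameSmearLoopB seg (i + 4) (res ++ List.replicate chunk.length c)
  else res
termination_by seg.length - i

def frame_smear_alt (chan : List Int) (start : Int) (end_ : Int) (block_size : Int) : List Int :=
  pySliceAssign chan start end_
    (frameSmearLoopB (PySem.List.slice chan (some start) (some end_)) 0 [])

-- ===== PRECONDITION & SPEC =====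
def Spec_frame_smear (chan : List Int) (start : Int) (end_ : Int) (block_size : Int) (out : List Int) : Prop := out = frame_smear_alt chan start end_ block_size
instance (chan : List Int) (start : Int) (end_ : Int) (block_size : Int) (out : List Int) : Decidable (Spec_frame_smear chan start end_ block_size out) := by unfold Spec_frame_smear; infer_instance

-- ===== CLAIM (what is proved, stated in full; the proofs are below) =====
def Claim_equal_frame_smear : Prop := ∀ (chan : List Int) (start : Int) (end_ : Int) (block_size : Int), Dom_frame_smear chan start end_ block_size → Spec_frame_smear chan start end_ block_size (frame_smear chan start end_ block_size)

-- ===== LEMMAS AND PROOFS =====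

-- Reference form of the smeared segment: head of each 4-chunk repeated for the chunk's length.
def smearRef : List Int → List Int
  | [] => []
  | h :: t => List.replicate (min 4 (t.length + 1)) h ++ smearRef (t.drop 3)
termination_by xs => xs.length
decreasing_by simp

theorem smearRef_nil : smearRef [] = [] := by simp [smearRef]

theorem smearRef_cons (h : Int) (t : List Int) :
    smearRef (h :: t) = List.replicate (min 4 (t.length + 1)) h ++ smearRef (t.drop 3) := by
  simp [smearRef]

theorem loopA_shift (t : List Int) : ∀ (res : List Int) (c : Int),
    frameSmearLoopA t res (c + 4) = frameSmearLoopA t res c := by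
  induction t with
  | nil => intro res c; rfl
  | cons s t ih =>
    intro res c
    have hm : (c + 4) % 4 = c % 4 := by omega
    simp only [frameSmearLoopA, hm]
    split
    · rw [show c + 4 + 1 = (c + 1) + 4 by ring, ih]
    · split <;> rw [show c + 4 + 1 = (c + 1) + 4 by ring, ih]

theorem loopA_eq_ref_aux : ∀ (n : Nat) (seg : List Int), seg.length ≤ n →
    ∀ (res : List Int), frameSmearLoopA seg res 0 = res ++ smearRef seg := by
  intro n
  induction n with
  | zero =>
    intro seg hlen res
    have : seg = [] := by cases seg <;> simp_all
    subst this; simp [frameSmearLoopA, smearRef_nil]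
  | succ n ih =>
    intro seg hlen res
    match seg with
    | [] => simp [frameSmearLoopA, smearRef_nil]
    | [a] =>
      simp [frameSmearLoopA, smearRef_cons, smearRef_nil]
    | [a, b] =>
      simp [frameSmearLoopA, smearRef_cons, smearRef_nil, PySem.List.pyGet?_neg_one,
        List.getLast?_append, List.replicate_succ]
    | [a, b, c] =>
      simp [frameSmearLoopA, smearRef_cons, smearRef_nil, PySem.List.pyGet?_neg_one,
        List.getLast?_append, List.replicate_succ]
    | a :: b :: c :: d :: t =>
      have h4 : t.length ≤ n := by simp at hlen; omega
      have step : frameSmearLoopA (a :: b :: c :: d :: t) res 0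
          = frameSmearLoopA t (res ++ [a, a, a, a]) 4 := by
        simp [frameSmearLoopA, PySem.List.pyGet?_neg_one, List.getLast?_append]
      rw [step, show (4 : Int) = 0 + 4 by ring, loopA_shift,
        ih t h4 (res ++ [a, a, a, a])]
      rw [smearRef_cons]
      have hmin : min 4 ((b :: c :: d :: t).length + 1) = 4 := by simp
      have hdrop : (b :: c :: d :: t).drop 3 = t := rfl
      rw [hmin, hdrop]
      simp [List.replicate_succ]

theorem loopA_eq_ref (seg : List Int) (res : List Int) :
    frameSmearLoopA seg res 0 = res ++ smearRef seg :=
  loopA_eq_ref_aux seg.length seg le_rfl res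

theorem loopB_eq_ref (seg : List Int) : ∀ (i : Nat) (res : List Int),
    frameSmearLoopB seg i res = res ++ smearRef (seg.drop i) := by
  intro i
  induction hk : seg.length - i using Nat.strong_induction_on generalizing i with
  | _ k ihk =>
    intro res
    rw [frameSmearLoopB]
    split
    · rename_i h
      have hchunk : PySem.List.slice seg (some (i : Int)) (some ((i : Int) + 4))
          = (seg.drop i).take 4 := by
        rw [show ((i : Int) + 4) = ((i + 4 : Nat) : Int) by push_cast; ring,
          PySem.List.slice_natCast]
        congr 1; omega
      match hd : seg.drop i with
      | [] =>
        exfalso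
        rw [List.drop_eq_nil_iff] at hd
        omega
      | h0 :: t0 =>
        have hchunk' : PySem.List.slice seg (some (i : Int)) (some ((i : Int) + 4))
            = h0 :: t0.take 3 := by rw [hchunk, hd]; rfl
        rw [hchunk']
        simp only []
        rw [ihk (seg.length - (i + 4)) (by omega) (i + 4) rfl]
        have hdd : seg.drop (i + 4) = t0.drop 3 := by
          have : seg.drop (i + 4) = (seg.drop i).drop 4 := by
            rw [List.drop_drop]
          rw [this, hd]; rfl
        rw [hdd, smearRef_cons]
        have hlen : (h0 :: t0.take 3).length = min 4 (t0.length + 1) := by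
          simp; omega
        rw [hlen, List.append_assoc]
    · rename_i h
      have hnil : seg.drop i = [] := by
        rw [List.drop_eq_nil_iff]; omega
      simp [hnil, smearRef_nil]

-- ===== VERDICT (by name: the statement is the Claim_ definition above) =====
theorem frame_smear_spec : Claim_equal_frame_smear := by
  intro chan start end_ block_size _
  unfold Spec_frame_smear frame_smear frame_smear_alt
  rw [loopA_eq_ref, loopB_eq_ref]
  simp
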